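-- pv_equiv track=rewrite | github.com/sizrailev/py2reqs | py2reqs/utils.py | get_module_parents
-- ===== SOURCE A (Python) =====
-- from typing import List, Union
--
-- def get_module_parents(full_module_name: str) -> List[str]:
--     """
--     Returns a list module's parent packages and subpackages.
--     Example: package1.subpackage1.module1 -> [package1, package1.subpackage1]
--     """
--     parts = full_module_name.split('.')
--     parts.pop()
--     parents = []
--     while parts:
--         parents.insert(0, '.'.join(parts))
--         parts.pop()
--     return parents
-- ===== SOURCE B (Python) =====
-- def get_module_parents(full_module_name):
--     """
--     Returns a list module's parent packages and subpackages.
--     Example: package1.subpackage1.module1 -> [package1, package1.subpackage1]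
--     """
--     parents = []
--     prefix = None
--     for component in full_module_name.split('.')[:-1]:
--         prefix = component if prefix is None else prefix + '.' + component
--         parents.append(prefix)
--     return parents
-- ===== Notes on version B (the rewrite author's own statement) =====
-- stated objective: simpler
-- what changed: Replaces A's backward pop/rejoin loop (which re-joins the whole remaining component list on every iteration and inserts at the front) by a single forward pass that extends a running dotted-prefix string and appends it, so there are no repeated join rescans and no front insertions.
import Mathlib
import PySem

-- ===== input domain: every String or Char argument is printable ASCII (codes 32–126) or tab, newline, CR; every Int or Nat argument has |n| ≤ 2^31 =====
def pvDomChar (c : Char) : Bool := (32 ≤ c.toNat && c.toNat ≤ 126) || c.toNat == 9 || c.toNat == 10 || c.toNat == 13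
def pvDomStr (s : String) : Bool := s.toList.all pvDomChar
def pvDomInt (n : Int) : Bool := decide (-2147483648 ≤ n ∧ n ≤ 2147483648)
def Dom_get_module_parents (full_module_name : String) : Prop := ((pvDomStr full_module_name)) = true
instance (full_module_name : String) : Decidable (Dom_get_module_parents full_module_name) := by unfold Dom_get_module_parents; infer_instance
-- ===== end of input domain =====

-- B replaces A's backward pop/rejoin/insert(0) loop by one forward pass with a running
-- prefix accumulator (objective: simpler); return values agree on every input.

-- ===== PORT A =====
-- while parts: parents.insert(0, '.'.join(parts)); parts.pop()
def pvLoopA (parts parents : List String) : List String :=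
  if parts.isEmpty then parents
  else
    let parents' := PySem.List.insert parents 0 (PySem.Str.join "." parts)
    match h : PySem.List.pop? parts with
    | none => parents'          -- unreachable: parts is nonempty here
    | some (_, rest) => pvLoopA rest parents'
termination_by parts.length
decreasing_by
  have h2 := PySem.List.length_of_pop?_eq_some parts h
  simp at h2
  omega

def get_module_parents (full_module_name : String) : List String :=
  match PySem.Str.split? full_module_name "." with
  | none => []                  -- unreachable: the separator "." is nonempty
  | some parts0 =>
    match PySem.List.pop? parts0 with
    | none => []                -- unreachable: split always returns a nonempty list
    | some (_, parts) => pvLoopA parts []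

-- ===== PORT B =====
-- for component in full_module_name.split('.')[:-1]:
--     prefix = component if prefix is None else prefix + '.' + component
--     parents.append(prefix)
def get_module_parents_alt (full_module_name : String) : List String :=
  let comps := PySem.List.slice ((PySem.Str.split? full_module_name ".").getD []) none (some (-1))
  (comps.foldl
    (fun (st : Option String × List String) component =>
      let p := match st.1 with
        | none => component
        | some pre => pre ++ "." ++ component
      (some p, st.2 ++ [p]))
    (none, [])).2

-- ===== PRECONDITION & SPEC =====
def Spec_get_module_parents (full_module_name : String) (out : List String) : Prop := out = get_module_parents_alt full_module_name
instance (full_module_name : String) (out : List String) : Decidable (Spec_get_module_parents full_module_name out) := by unfold Spec_get_module_parents; infer_instance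

-- ===== CLAIM (what is proved, stated in full; the proofs are below) =====
def Claim_equal_get_module_parents : Prop := ∀ (full_module_name : String), Dom_get_module_parents full_module_name → Spec_get_module_parents full_module_name (get_module_parents full_module_name)

-- ===== LEMMAS AND PROOFS =====

/-- The cumulative dotted prefixes of `cs` continuing a (possibly empty) prefix list `pre`. -/
def prefJoins (pre : List String) : List String → List String
  | [] => []
  | c :: cs => PySem.Str.join "." (pre ++ [c]) :: prefJoins (pre ++ [c]) cs

theorem chars_join_append_singleton (sep : List Char) (pre : List (List Char)) (c : List Char)
    (h : pre ≠ []) :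
    PySem.Chars.join sep (pre ++ [c]) = PySem.Chars.join sep pre ++ sep ++ c := by
  induction pre with
  | nil => exact absurd rfl h
  | cons p ps ih =>
    cases ps with
    | nil => simp [PySem.Chars.join_cons_cons, PySem.Chars.join_singleton]
    | cons q qs =>
      have ih' := ih (by simp)
      simp only [List.cons_append, PySem.Chars.join_cons_cons] at *
      simp [ih']

theorem str_join_append_singleton (pre : List String) (c : String) (h : pre ≠ []) :
    PySem.Str.join "." (pre ++ [c]) = PySem.Str.join "." pre ++ "." ++ c := by
  apply String.toList_injective
  simp only [PySem.Str.toList_join, List.map_append, List.map, String.toList_append]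
  exact chars_join_append_singleton ".".toList (pre.map String.toList) c.toList (by simpa using h)

/-- The state B reaches after consuming the component list `pre`. -/
def optJ (pre : List String) : Option String :=
  if pre = [] then none else some (PySem.Str.join "." pre)

theorem loopB_eq (cs : List String) : ∀ (pre : List String) (acc : List String),
    (cs.foldl
      (fun (st : Option String × List String) component =>
        let p := match st.1 with
          | none => component
          | some pr => pr ++ "." ++ component
        (some p, st.2 ++ [p]))
      (optJ pre, acc)).2 = acc ++ prefJoins pre cs := by
  induction cs with
  | nil => intro pre acc; simp [prefJoins]
  | cons c cs ih =>
    intro pre acc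
    have hstep : (match optJ pre with
        | none => c
        | some pr => pr ++ "." ++ c) = PySem.Str.join "." (pre ++ [c]) := by
      by_cases h : pre = []
      · subst h
        apply String.toList_injective
        simp [optJ, PySem.Str.toList_join, PySem.Chars.join_singleton]
      · simp [optJ, h, str_join_append_singleton pre c h]
    have hopt : some (PySem.Str.join "." (pre ++ [c])) = optJ (pre ++ [c]) := by
      simp [optJ]
    simp only [List.foldl_cons, hstep, hopt]
    rw [ih (pre ++ [c]) (acc ++ [PySem.Str.join "." (pre ++ [c])])]
    simp [prefJoins]

theorem prefJoins_append_singleton (l : List String) : ∀ (pre : List String) (x : String),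
    prefJoins pre (l ++ [x]) = prefJoins pre l ++ [PySem.Str.join "." (pre ++ l ++ [x])] := by
  induction l with
  | nil => intro pre x; simp [prefJoins]
  | cons c cs ih =>
    intro pre x
    simp only [List.cons_append, prefJoins, ih (pre ++ [c]) x, List.append_assoc]
    simp

theorem insert_zero (acc : List String) (v : String) :
    PySem.List.insert acc 0 v = v :: acc := by
  simp [PySem.List.insert, PySem.List.sliceIndices]

theorem loopA_eq (parts : List String) : ∀ (acc : List String),
    pvLoopA parts acc = prefJoins [] parts ++ acc := by
  induction parts using List.reverseRecOn with
  | nil => intro acc; rw [pvLoopA.eq_def]; simp [prefJoins]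
  | append_singleton l x ih =>
    intro acc
    rw [pvLoopA.eq_def]
    simp only [insert_zero]
    rw [if_neg (by simp)]
    split
    next hp => rw [PySem.List.pop?_last] at hp; cases hp
    next fst rest hp =>
      rw [PySem.List.pop?_last] at hp
      cases hp
      rw [ih, prefJoins_append_singleton]
      simp

theorem slice_neg_one (xs : List String) :
    PySem.List.slice xs none (some (-1)) = xs.dropLast := by
  cases xs with
  | nil => simp [PySem.List.slice, PySem.List.clampIdx]
  | cons a l =>
    simp only [PySem.List.slice, PySem.List.clampIdx, List.dropLast_eq_take]
    norm_num
    split_ifs with h <;> omega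

-- ===== VERDICT (by name: the statement is the Claim_ definition above) =====
theorem get_module_parents_spec : Claim_equal_get_module_parents := by
  intro fm _
  unfold Spec_get_module_parents get_module_parents get_module_parents_alt
  cases hs : PySem.Str.split? fm "." with
  | none => simp [slice_neg_one]
  | some parts0 =>
    simp only [Option.getD_some, slice_neg_one]
    induction parts0 using List.reverseRecOn with
    | nil => simp [PySem.List.pop?, PySem.List.pyIdx?]
    | append_singleton l x _ =>
      rw [PySem.List.pop?_last]
      have hB := loopB_eq l [] []
      simp only [optJ, if_true, List.nil_append] at hB
      simp only [loopA_eq, List.append_nil, List.dropLast_concat]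
      exact hB.symm
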